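-- pv_equiv track=rewrite | github.com/Kalthurnah/Projet_Gomoku | Projet_Gomoku.py | conversion_pos_coord
-- ===== SOURCE A (Python) =====
-- def conversion_pos_coord(position: str):
--     """
--     Convertit une position entrée par l'utilisateur sous la forme "A4" en un tuple coordonnées d'une grille, sous la forme (0,3)
--
--     :param position: string de la forme "A4", contenant une lettre suivie d'un nombre.
--     :return: un tuple correspondant aux coordonnées sur la grille de la position fournie. Si l'entrée est invalide, l'un des membres de ce tuple est -1.
--     """
--
--     try:
--         # On recupere lettre (1er char du string) et nombre (chars au dela du premier) depuis le string position donné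
--         (lettre, nombre) = (position[0], position[1:])
--         colonne = int(nombre) - 1  # On tente de convertir le string du nombre en entier
--     except:
--         return (-1, -1)  # Si le caractère n'a pu être converti en entier ou pas pu être obtenu, on retourne -1,-1
--
--     if (colonne < 0 or colonne >= 15):  # Si la colonne est supérieure ou égale à 15, ou inférieure à 0 elle est invalide
--         colonne = -1  # On remplace alors la colonne par -1
--
--     lettres = ["A", "B", "C", "D", "E", "F", "G", "H", "I", "J", "K", "L", "M", "N", "O"]
--     ligne = -1  # Coordonnée invalide par défaut
--     for k in range(0, 15):
--         if lettres[k] == lettre: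
--             ligne = k
--             break  # Sortie de la boucle quand la lettre est trouvée
--
--     return (ligne, colonne)
-- ===== SOURCE B (Python) =====
-- def conversion_pos_coord(position: str):
--     try:
--         colonne = int(position[1:]) - 1
--     except:
--         return (-1, -1)
--     if not (0 <= colonne < 15):
--         colonne = -1
--     idx = ord(position[0]) - ord('A')
--     ligne = idx if 0 <= idx <= 14 else -1
--     return (ligne, colonne)
-- ===== Notes on version B (the rewrite author's own statement) =====
-- stated objective: idiomatic
-- what changed: The row is computed by a closed-form ord(letter)-ord('A') arithmetic check instead of scanning a 15-element letter list with a break loop.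
import Mathlib
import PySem

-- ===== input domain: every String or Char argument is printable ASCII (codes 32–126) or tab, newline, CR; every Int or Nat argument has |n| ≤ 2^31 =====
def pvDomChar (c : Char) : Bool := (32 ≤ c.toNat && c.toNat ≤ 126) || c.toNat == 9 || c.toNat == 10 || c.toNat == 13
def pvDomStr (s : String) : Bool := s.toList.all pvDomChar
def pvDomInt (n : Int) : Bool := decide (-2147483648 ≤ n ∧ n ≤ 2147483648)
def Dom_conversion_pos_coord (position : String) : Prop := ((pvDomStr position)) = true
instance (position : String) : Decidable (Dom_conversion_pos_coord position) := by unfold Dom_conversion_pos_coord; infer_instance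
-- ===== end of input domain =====

-- B computes the row by closed-form ord arithmetic instead of A's break-loop scan over the 15-letter list (idiomatic).


-- ===== PORT A =====
def pvLettres : List Char := ['A','B','C','D','E','F','G','H','I','J','K','L','M','N','O']

-- A's 'for k in range(0, 15): if lettres[k] == lettre: ligne = k; break' — recursion = loop with break
def pvFindRow (lettre : Char) (k : Nat) : Int :=
  if k < 15 then
    -- lettres[k]: k < 15 = len(lettres) here, so indexing cannot raise; getD is exact
    if pvLettres.getD k 'A' = lettre then (k : Int)
    else pvFindRow lettre (k + 1)
  else -1
termination_by 15 - k

def conversion_pos_coord (position : String) : Int × Int :=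
  match PySem.Str.pyGet? position 0 with
  | none => (-1, -1)            -- position[0] raises IndexError → except branch
  | some lettre =>
    match PySem.Int.ofStr? (PySem.Str.slice position (some 1) none) with
    | none => (-1, -1)          -- int(nombre) raises ValueError → except branch
    | some v =>
      let colonne := v - 1
      let colonne := if colonne < 0 ∨ 15 ≤ colonne then -1 else colonne
      (pvFindRow lettre 0, colonne)

-- ===== PORT B =====
def conversion_pos_coord_alt (position : String) : Int × Int :=
  match PySem.Int.ofStr? (PySem.Str.slice position (some 1) none) with
  | none => (-1, -1)            -- int(position[1:]) raises → except branch
  | some n =>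
    let colonne := n - 1
    let colonne := if 0 ≤ colonne ∧ colonne < 15 then colonne else -1
    match PySem.Str.pyGet? position 0 with
    | none => (-1, -1)          -- unreachable: int(position[1:]) succeeded, so position ≠ ""
    | some c =>
      let idx : Int := (c.toNat : Int) - 65    -- ord(position[0]) - ord('A')
      let ligne := if 0 ≤ idx ∧ idx ≤ 14 then idx else -1
      (ligne, colonne)

-- ===== PRECONDITION & SPEC =====
def Spec_conversion_pos_coord (position : String) (out : Int × Int) : Prop := out = conversion_pos_coord_alt position
instance (position : String) (out : Int × Int) : Decidable (Spec_conversion_pos_coord position out) := by unfold Spec_conversion_pos_coord; infer_instance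

-- ===== CLAIM (what is proved, stated in full; the proofs are below) =====
def Claim_equal_conversion_pos_coord : Prop := ∀ (position : String), Dom_conversion_pos_coord position → Spec_conversion_pos_coord position (conversion_pos_coord position)

-- ===== LEMMAS AND PROOFS =====

theorem pvCharEq_iff (c d : Char) : c = d ↔ c.toNat = d.toNat := by
  exact ⟨fun h => by rw [h], fun h => Char.ext (UInt32.toNat_inj.mp h)⟩

-- invariant of A's break-loop: from index k on, the scan finds c iff its code is in [65+k, 79]
theorem pvFindRow_inv (c : Char) : ∀ (n k : Nat), k + n = 15 →
    pvFindRow c k = (if 65 + k ≤ c.toNat ∧ c.toNat ≤ 79 then ((c.toNat : Int) - 65) else -1) := by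
  intro n
  induction n with
  | zero =>
    intro k hk
    rw [pvFindRow, if_neg (by omega), if_neg (by omega)]
  | succ n ih =>
    intro k hk
    have hk15 : k < 15 := by omega
    rw [pvFindRow, if_pos hk15]
    have hval : (pvLettres.getD k 'A').toNat = 65 + k := by interval_cases k <;> decide
    by_cases hc : pvLettres.getD k 'A' = c
    · have hcc : c.toNat = 65 + k := by rw [← hc]; exact hval
      rw [if_pos hc, if_pos (by omega)]
      omega
    · have hne : c.toNat ≠ 65 + k := by
        intro h
        exact hc ((pvCharEq_iff _ _).mpr (by omega))
      rw [if_neg hc, ih (k + 1) (by omega)]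
      split_ifs <;> omega

theorem pvFindRow_eq (c : Char) :
    pvFindRow c 0 = (if 0 ≤ ((c.toNat : Int) - 65) ∧ ((c.toNat : Int) - 65) ≤ 14 then ((c.toNat : Int) - 65) else -1) := by
  rw [pvFindRow_inv c 15 0 rfl]
  split_ifs <;> omega

theorem conversion_pos_coord_eq_alt (position : String) :
    conversion_pos_coord position = conversion_pos_coord_alt position := by
  unfold conversion_pos_coord conversion_pos_coord_alt
  cases hget : PySem.Str.pyGet? position 0 with
  | none =>
    -- position is empty, so position[1:] = "" and int("") fails too
    have hnil : position.toList = [] := by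
      by_contra h
      cases hl : position.toList with
      | nil => exact h hl
      | cons a as => simp [hl] at hget
    have hempty : position = "" := String.toList_eq_nil_iff.mp hnil
    subst hempty
    decide
  | some c =>
    cases hint : PySem.Int.ofStr? (PySem.Str.slice position (some 1) none) with
    | none => simp
    | some v =>
      simp only
      rw [pvFindRow_eq, Prod.mk.injEq]
      exact ⟨rfl, by split_ifs <;> omega⟩

-- ===== VERDICT (by name: the statement is the Claim_ definition above) =====
theorem conversion_pos_coord_spec : Claim_equal_conversion_pos_coord := by
  intro position _
  exact conversion_pos_coord_eq_alt position
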